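-- pv_equiv track=rewrite | github.com/ftakelait/CSCI-384 | A* Search Black–White Sliding Puzzle/hw_1_astar_grader.py | ref_is_goal
-- ===== SOURCE A (Python) =====
-- from typing import Dict, Tuple, List, Iterable, Optional, Set
--
-- State = Tuple[str, ...]
--
-- def ref_is_goal(s: State) -> bool:
--     seen_W = False
--     for c in s:
--         if c == 'W':
--             seen_W = True
--         elif c == 'B' and seen_W:
--             return False
--     return True
-- ===== SOURCE B (Python) =====
-- def ref_is_goal(s) -> bool:
--     bw = [c for c in s if c == 'B' or c == 'W']
--     return bw == sorted(bw)
-- ===== Notes on version B (the rewrite author's own statement) =====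
-- stated objective: simpler
-- what changed: Replaces the early-exit state-machine scan (seen_W flag) by filtering to the B/W tokens and comparing the filtered list with its sorted form ('B' < 'W'), a two-line declarative formulation.
import Mathlib
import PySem

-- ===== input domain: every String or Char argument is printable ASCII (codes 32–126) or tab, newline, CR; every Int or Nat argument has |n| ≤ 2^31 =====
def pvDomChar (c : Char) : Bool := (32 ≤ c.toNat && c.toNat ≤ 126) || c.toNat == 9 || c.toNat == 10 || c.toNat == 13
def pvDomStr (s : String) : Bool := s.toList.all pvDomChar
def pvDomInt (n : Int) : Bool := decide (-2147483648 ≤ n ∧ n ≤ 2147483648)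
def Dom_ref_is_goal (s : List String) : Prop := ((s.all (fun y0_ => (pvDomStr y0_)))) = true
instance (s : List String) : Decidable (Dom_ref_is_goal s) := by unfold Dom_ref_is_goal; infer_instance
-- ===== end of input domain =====

-- B replaces A's early-exit seen_W scan with "filter to B/W tokens, compare with sorted" (simpler, declarative).


-- ===== PORT A =====
-- A's loop: scan left to right carrying the seen_W flag; return False at a 'B' after a 'W'.
def refLoop : List String → Bool → Bool
  | [], _ => true
  | c :: rest, seenW =>
    if c = "W" then refLoop rest true
    else if c = "B" ∧ seenW = true then false
    else refLoop rest seenW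

def ref_is_goal (s : List String) : Bool := refLoop s false

-- ===== PORT B =====
def ref_is_goal_alt (s : List String) : Bool :=
  let bw := s.filter (fun c => c == "B" || c == "W")
  decide (bw = PySem.List.sorted bw (fun x => x) false)

-- ===== PRECONDITION & SPEC =====
def Spec_ref_is_goal (s : List String) (out : Bool) : Prop := out = ref_is_goal_alt s
instance (s : List String) (out : Bool) : Decidable (Spec_ref_is_goal s out) := by unfold Spec_ref_is_goal; infer_instance

-- ===== CLAIM (what is proved, stated in full; the proofs are below) =====
def Claim_equal_ref_is_goal : Prop := ∀ (s : List String), Dom_ref_is_goal s → Spec_ref_is_goal s (ref_is_goal s)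

-- ===== LEMMAS AND PROOFS =====

def pvBW (s : List String) : List String := s.filter (fun c => c == "B" || c == "W")

theorem mem_pvBW {s : List String} {x : String} (h : x ∈ pvBW s) : x = "B" ∨ x = "W" := by
  simp [pvBW, List.mem_filter] at h
  tauto

theorem refLoop_eq (s : List String) (seenW : Bool) :
    refLoop s seenW
      = decide ((pvBW s).Pairwise (· ≤ ·) ∧ (seenW = true → "B" ∉ pvBW s)) := by
  induction s generalizing seenW with
  | nil => simp [refLoop, pvBW]
  | cons c rest ih =>
    by_cases hW : c = "W"
    · subst hW
      rw [show refLoop ("W" :: rest) seenW = refLoop rest true from by simp [refLoop], ih true]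
      apply decide_eq_decide.mpr
      have hbw : pvBW ("W" :: rest) = "W" :: pvBW rest := by simp [pvBW]
      rw [hbw]
      constructor
      · rintro ⟨hp, hnb⟩
        refine ⟨List.pairwise_cons.mpr ⟨fun x hx => ?_, hp⟩, fun _ hmem => ?_⟩
        · rcases mem_pvBW hx with h | h <;> subst h
          · exact absurd hx (hnb rfl)
          · exact le_refl _
        · rcases List.mem_cons.mp hmem with h | h
          · exact absurd h (by decide)
          · exact hnb rfl h
      · rintro ⟨hp, _⟩
        rcases List.pairwise_cons.mp hp with ⟨hall, hp'⟩
        refine ⟨hp', fun _ hB => ?_⟩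
        have := hall _ hB
        exact absurd this (by simp; decide)
    · by_cases hB : c = "B"
      · subst hB
        cases seenW with
        | true =>
          rw [show refLoop ("B" :: rest) true = false from by simp [refLoop]]
          have : "B" ∈ pvBW ("B" :: rest) := by simp [pvBW]
          simp [this]
        | false =>
          rw [show refLoop ("B" :: rest) false = refLoop rest false from by simp [refLoop], ih false]
          apply decide_eq_decide.mpr
          have hbw : pvBW ("B" :: rest) = "B" :: pvBW rest := by simp [pvBW]
          rw [hbw]
          constructor
          · rintro ⟨hp, -⟩
            refine ⟨List.pairwise_cons.mpr ⟨fun x hx => ?_, hp⟩, by simp⟩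
            rcases mem_pvBW hx with h | h <;> subst h
            · exact le_refl _
            · exact le_of_lt (by simp; decide)
          · rintro ⟨hp, -⟩
            exact ⟨(List.pairwise_cons.mp hp).2, by simp⟩
      · rw [show refLoop (c :: rest) seenW = refLoop rest seenW from by
              simp [refLoop, hW, hB], ih seenW]
        apply decide_eq_decide.mpr
        have hbw : pvBW (c :: rest) = pvBW rest := by
          simp [pvBW, List.filter_cons]
          exact ⟨hB, hW⟩
        rw [hbw]

theorem alt_eq (s : List String) :
    ref_is_goal_alt s = decide ((pvBW s).Pairwise (· ≤ ·)) := by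
  unfold ref_is_goal_alt
  apply decide_eq_decide.mpr
  show (pvBW s = PySem.List.sorted (pvBW s) (fun x => x) false) ↔ _
  constructor
  · intro h
    have := PySem.List.sorted_pairwise (pvBW s) (fun x => x) (κ := String)
    rw [← h] at this
    exact this
  · intro h
    exact (PySem.List.sorted_eq_self_of_pairwise (pvBW s) (fun x => x) h).symm

-- ===== VERDICT (by name: the statement is the Claim_ definition above) =====
theorem ref_is_goal_spec : Claim_equal_ref_is_goal := by
  intro s _
  show ref_is_goal s = ref_is_goal_alt s
  rw [ref_is_goal, refLoop_eq, alt_eq]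
  simp
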